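-- pv_equiv track=rewrite | github.com/NRLBM/assembly | workflow/scripts/bexsero_coverage.py | process_NadA
-- ===== SOURCE A (Python) =====
-- def process_NadA(typing_result, results_dict, scheme_dict):
--   if 'NadA_peptide' not in typing_result:
--     results_dict['NadA_peptide', 'BAST'] = 'missing/novel allele'
--     results_dict['NadA_peptide', 'gMATS'] = 'uncovered'
--     results_dict['NadA_peptide', 'alleles'] = '-'
--   else:
--     typing_list = typing_result['NadA_peptide']
--     results_dict['NadA_peptide', 'gMATS'] = 'uncovered'
--     exact_match_BAST = sum([x['allele_id'] in scheme_dict['BAST_NadA_peptide_exact_match'] for x in typing_list]) > 0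
--     cross_reactive_BAST = sum([x['allele_id'] in scheme_dict['BAST_NadA_peptide_cross_reactive'] for x in typing_list]) > 0
--     none_result_BAST = sum([x['allele_id'] in scheme_dict['BAST_NadA_peptide_none'] for x in typing_list]) > 0
--     if exact_match_BAST:
--       results_dict['NadA_peptide', 'BAST'] = 'exact_match'
--     elif cross_reactive_BAST:
--       results_dict['NadA_peptide', 'BAST'] = 'cross-reactive'
--     elif none_result_BAST:
--       results_dict['NadA_peptide', 'BAST'] = 'none'
--     else:
--       results_dict['NadA_peptide', 'BAST'] = 'insufficient data'
--     results_dict['NadA_peptide', 'alleles'] = '|'.join([x['allele_id'] for x in typing_list])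
--   return results_dict
-- ===== SOURCE B (Python) =====
-- def process_NadA(typing_result, results_dict, scheme_dict):
--     if 'NadA_peptide' not in typing_result:
--         results_dict['NadA_peptide', 'BAST'] = 'missing/novel allele'
--         results_dict['NadA_peptide', 'gMATS'] = 'uncovered'
--         results_dict['NadA_peptide', 'alleles'] = '-'
--         return results_dict
--     groups = [scheme_dict['BAST_NadA_peptide_exact_match'],
--               scheme_dict['BAST_NadA_peptide_cross_reactive'],
--               scheme_dict['BAST_NadA_peptide_none']]
--     labels = ['exact_match', 'cross-reactive', 'none', 'insufficient data']
--     best = 3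
--     ids = []
--     for x in typing_result['NadA_peptide']:
--         aid = x['allele_id']
--         ids.append(aid)
--         rank = next((i for i, g in enumerate(groups) if aid in g), 3)
--         if rank < best:
--             best = rank
--     results_dict['NadA_peptide', 'gMATS'] = 'uncovered'
--     results_dict['NadA_peptide', 'BAST'] = labels[best]
--     results_dict['NadA_peptide', 'alleles'] = '|'.join(ids)
--     return results_dict
-- ===== Notes on version B (the rewrite author's own statement) =====
-- stated objective: alternative
-- what changed: B makes a single pass over the typing list keeping a numeric priority-rank accumulator (index of the first scheme group containing each allele id, minimised over the list) and picks the BAST label by table lookup labels[best], eliminating A's three separate indicator-sum scans and the if/elif priority chain; ids are collected in the same pass for the join.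
import Mathlib
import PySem

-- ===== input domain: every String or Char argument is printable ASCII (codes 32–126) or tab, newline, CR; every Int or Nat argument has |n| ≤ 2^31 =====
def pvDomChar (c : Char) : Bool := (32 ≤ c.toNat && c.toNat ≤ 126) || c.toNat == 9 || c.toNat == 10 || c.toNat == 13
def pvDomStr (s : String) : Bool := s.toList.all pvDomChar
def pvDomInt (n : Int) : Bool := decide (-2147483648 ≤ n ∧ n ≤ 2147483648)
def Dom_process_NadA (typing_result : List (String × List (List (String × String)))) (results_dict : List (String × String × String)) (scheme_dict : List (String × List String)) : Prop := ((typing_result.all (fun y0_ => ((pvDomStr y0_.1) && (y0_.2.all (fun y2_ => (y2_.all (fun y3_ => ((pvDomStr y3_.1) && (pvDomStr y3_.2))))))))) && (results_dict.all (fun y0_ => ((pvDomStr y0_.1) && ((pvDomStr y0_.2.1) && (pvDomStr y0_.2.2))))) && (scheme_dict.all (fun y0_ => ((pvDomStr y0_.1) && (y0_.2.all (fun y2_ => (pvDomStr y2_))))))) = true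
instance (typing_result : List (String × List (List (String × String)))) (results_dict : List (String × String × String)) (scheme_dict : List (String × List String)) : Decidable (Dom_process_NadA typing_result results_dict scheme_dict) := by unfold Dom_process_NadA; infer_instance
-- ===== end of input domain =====

-- B replaces A's three staged indicator-sum scans and if/elif priority chain by ONE pass over the
-- typing list keeping a minimum priority-rank accumulator (rank = index of the first scheme group
-- containing the allele id) and a table lookup labels[best] for the BAST string; both A and B
-- mutate results_dict in place in Python — the equivalence proved is about the returned dict
-- (the mutations coincide on admitted inputs anyway).

-- ===== PORT A =====
-- results_dict has tuple keys ('NadA_peptide', field), flattened here to (String × String × String);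
-- setField is Python's results_dict['NadA_peptide', f] = v: overwrite the first matching key in
-- place, or append a new entry.
def setField (d : List (String × String × String)) (k1 k2 v : String) : List (String × String × String) :=
  match d with
  | [] => [(k1, k2, v)]
  | (a, b, c) :: t => if a = k1 ∧ b = k2 then (a, b, v) :: t else (a, b, c) :: setField t k1 k2 v

def process_NadA (typing_result : List (String × List (List (String × String)))) (results_dict : List (String × String × String)) (scheme_dict : List (String × List String)) : List (String × String × String) :=
  match List.lookup "NadA_peptide" typing_result with
  | none =>
    -- results_dict[...,'BAST'] = 'missing/novel allele'; [...,'gMATS'] = 'uncovered'; [...,'alleles'] = '-'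
    setField (setField (setField results_dict "NadA_peptide" "BAST" "missing/novel allele")
      "NadA_peptide" "gMATS" "uncovered") "NadA_peptide" "alleles" "-"
  | some typing_list =>
    let rd1 := setField results_dict "NadA_peptide" "gMATS" "uncovered"
    -- x['allele_id'] / scheme_dict[...] raise KeyError when absent; Pre_ guarantees presence,
    -- so the getD defaults are never taken on admitted inputs.
    let exact_match_BAST :=
      0 < (typing_list.map (fun x => if ((List.lookup "BAST_NadA_peptide_exact_match" scheme_dict).getD []).contains ((List.lookup "allele_id" x).getD "") then (1 : Int) else 0)).sum
    let cross_reactive_BAST :=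
      0 < (typing_list.map (fun x => if ((List.lookup "BAST_NadA_peptide_cross_reactive" scheme_dict).getD []).contains ((List.lookup "allele_id" x).getD "") then (1 : Int) else 0)).sum
    let none_result_BAST :=
      0 < (typing_list.map (fun x => if ((List.lookup "BAST_NadA_peptide_none" scheme_dict).getD []).contains ((List.lookup "allele_id" x).getD "") then (1 : Int) else 0)).sum
    let rd2 :=
      if exact_match_BAST then setField rd1 "NadA_peptide" "BAST" "exact_match"
      else if cross_reactive_BAST then setField rd1 "NadA_peptide" "BAST" "cross-reactive"
      else if none_result_BAST then setField rd1 "NadA_peptide" "BAST" "none"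
      else setField rd1 "NadA_peptide" "BAST" "insufficient data"
    setField rd2 "NadA_peptide" "alleles"
      (PySem.Str.join "|" (typing_list.map (fun x => (List.lookup "allele_id" x).getD "")))

-- ===== PORT B =====
-- port of Source B's `next((i for i, g in enumerate(groups) if aid in g), 3)`
def rankOf (groups : List (List String)) (i : Nat) (aid : String) : Nat :=
  match groups with
  | [] => 3
  | g :: t => if g.contains aid then i else rankOf t (i + 1) aid

def process_NadA_alt (typing_result : List (String × List (List (String × String)))) (results_dict : List (String × String × String)) (scheme_dict : List (String × List String)) : List (String × String × String) :=
  match List.lookup "NadA_peptide" typing_result with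
  | none =>
    setField (setField (setField results_dict "NadA_peptide" "BAST" "missing/novel allele")
      "NadA_peptide" "gMATS" "uncovered") "NadA_peptide" "alleles" "-"
  | some entry =>
    let groups : List (List String) :=
      [(List.lookup "BAST_NadA_peptide_exact_match" scheme_dict).getD [],
       (List.lookup "BAST_NadA_peptide_cross_reactive" scheme_dict).getD [],
       (List.lookup "BAST_NadA_peptide_none" scheme_dict).getD []]
    let labels : List String := ["exact_match", "cross-reactive", "none", "insufficient data"]
    -- the single pass: state = (best rank so far, ids so far)
    let st := entry.foldl (fun (st : Nat × List String) x =>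
        let aid := (List.lookup "allele_id" x).getD ""
        let rank := rankOf groups 0 aid
        (if rank < st.1 then rank else st.1, st.2 ++ [aid])) (3, [])
    setField (setField (setField results_dict "NadA_peptide" "gMATS" "uncovered")
      "NadA_peptide" "BAST" (labels.getD st.1 "")) "NadA_peptide" "alleles"
      (PySem.Str.join "|" st.2)

-- ===== PRECONDITION & SPEC =====
-- Pre_ excludes the inputs where Python A raises KeyError ('NadA_peptide' present but a typing
-- entry lacks 'allele_id', or scheme_dict lacks a BAST key and the typing list is nonempty) and
-- the empty-typing-list case with a BAST key missing, where A's empty comprehensions skip the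
-- scheme lookups and return 'insufficient data' while B's up-front group fetch raises KeyError.
def Pre_process_NadA (typing_result : List (String × List (List (String × String)))) (results_dict : List (String × String × String)) (scheme_dict : List (String × List String)) : Prop :=
  (List.lookup "NadA_peptide" typing_result).isNone
  ∨ ((List.lookup "BAST_NadA_peptide_exact_match" scheme_dict).isSome
     ∧ (List.lookup "BAST_NadA_peptide_cross_reactive" scheme_dict).isSome
     ∧ (List.lookup "BAST_NadA_peptide_none" scheme_dict).isSome
     ∧ ∀ x ∈ (List.lookup "NadA_peptide" typing_result).getD [], (List.lookup "allele_id" x).isSome)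
instance (typing_result : List (String × List (List (String × String)))) (results_dict : List (String × String × String)) (scheme_dict : List (String × List String)) : Decidable (Pre_process_NadA typing_result results_dict scheme_dict) := by unfold Pre_process_NadA; infer_instance
def pvWitness_process_NadA : (List (String × List (List (String × String)))) × (List (String × String × String)) × (List (String × List String)) :=
  ([("NadA_peptide", [[("allele_id", "7")]])], [],
   [("BAST_NadA_peptide_exact_match", ["7"]), ("BAST_NadA_peptide_cross_reactive", []), ("BAST_NadA_peptide_none", [])])

def Spec_process_NadA (typing_result : List (String × List (List (String × String)))) (results_dict : List (String × String × String)) (scheme_dict : List (String × List String)) (out : List (String × String × String)) : Prop := out = process_NadA_alt typing_result results_dict scheme_dict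
instance (typing_result : List (String × List (List (String × String)))) (results_dict : List (String × String × String)) (scheme_dict : List (String × List String)) (out : List (String × String × String)) : Decidable (Spec_process_NadA typing_result results_dict scheme_dict out) := by unfold Spec_process_NadA; infer_instance

-- ===== CLAIM =====
def Claim_equal_process_NadA : Prop := ∀ (typing_result : List (String × List (List (String × String)))) (results_dict : List (String × String × String)) (scheme_dict : List (String × List String)), Dom_process_NadA typing_result results_dict scheme_dict → Pre_process_NadA typing_result results_dict scheme_dict → Spec_process_NadA typing_result results_dict scheme_dict (process_NadA typing_result results_dict scheme_dict)

-- ===== LEMMAS AND PROOFS =====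

-- A's indicator sum is positive iff the Boolean scan finds an element.
theorem sum_indicator_pos_iff {α : Type} (l : List α) (p : α → Bool) :
    (0 < (l.map (fun x => if p x then (1 : Int) else 0)).sum) ↔ l.any p = true := by
  induction l with
  | nil => simp
  | cons a t ih =>
    simp only [List.map_cons, List.sum_cons, List.any_cons]
    by_cases h : p a = true
    · simp only [h, if_true, Bool.true_or, iff_true]
      have : 0 ≤ (t.map (fun x => if p x then (1 : Int) else 0)).sum := by
        apply List.sum_nonneg; intro y hy
        simp only [List.mem_map] at hy
        obtain ⟨z, _, rfl⟩ := hy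
        split <;> omega
      omega
    · have hpa : p a = false := by simpa using h
      simp only [hpa, Bool.false_eq_true, if_false, zero_add, Bool.false_or]
      exact ih

-- The fold's id component accumulates the mapped ids in order.
theorem fold_snd {α : Type} (r : α → Nat) (f : α → String) :
    ∀ (l : List α) (b : Nat) (acc : List String),
      (l.foldl (fun (st : Nat × List String) x =>
        (if r x < st.1 then r x else st.1, st.2 ++ [f x])) (b, acc)).2 = acc ++ l.map f := by
  intro l
  induction l with
  | nil => simp
  | cons a t ih => intro b acc; simp [List.foldl_cons, ih]

-- The fold's rank component is min b (min of ranks).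
theorem fold_fst {α : Type} (r : α → Nat) (f : α → String) :
    ∀ (l : List α) (b : Nat) (acc : List String),
      (l.foldl (fun (st : Nat × List String) x =>
        (if r x < st.1 then r x else st.1, st.2 ++ [f x])) (b, acc)).1
      = l.foldl (fun b x => min b (r x)) b := by
  intro l
  induction l with
  | nil => simp
  | cons a t ih =>
    intro b acc
    simp only [List.foldl_cons]
    have hm : (if r a < b then r a else b) = min b (r a) := by split_ifs <;> omega
    rw [ih, hm]

-- The minimum of nested-if ranks equals the if/elif chain over the three scans.
theorem min_rank_chain {α : Type} (p0 p1 p2 : α → Bool) :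
    ∀ (l : List α) (b : Nat), b ≤ 3 →
      l.foldl (fun b x => min b (if p0 x then 0 else if p1 x then 1 else if p2 x then 2 else 3)) b
      = min b (if l.any p0 then 0 else if l.any p1 then 1 else if l.any p2 then 2 else 3) := by
  intro l
  induction l with
  | nil => intro b hb; simp; omega
  | cons a t ih =>
    intro b hb
    simp only [List.foldl_cons, List.any_cons]
    rw [ih _ (le_trans (Nat.min_le_left _ _) hb)]
    by_cases h0 : p0 a <;> by_cases h1 : p1 a <;> by_cases h2 : p2 a <;>
      simp [h0, h1, h2, Nat.min_def] <;>
      first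
        | omega
        | (split_ifs <;> omega)

-- ===== VERDICT =====
theorem process_NadA_spec : Claim_equal_process_NadA := by
  intro tr rd sd _ _
  unfold Spec_process_NadA process_NadA process_NadA_alt
  cases h : List.lookup "NadA_peptide" tr with
  | none => rfl
  | some tl =>
    simp only
    set g0 := (List.lookup "BAST_NadA_peptide_exact_match" sd).getD [] with hg0
    set g1 := (List.lookup "BAST_NadA_peptide_cross_reactive" sd).getD [] with hg1
    set g2 := (List.lookup "BAST_NadA_peptide_none" sd).getD [] with hg2
    set f : List (String × String) → String := fun x => (List.lookup "allele_id" x).getD "" with hf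
    have hfoldfst :
        (tl.foldl (fun (st : Nat × List String) x =>
          (if rankOf [g0, g1, g2] 0 (f x) < st.1 then rankOf [g0, g1, g2] 0 (f x) else st.1,
           st.2 ++ [f x])) (3, [])).1
        = (if tl.any (fun x => g0.contains (f x)) then 0
           else if tl.any (fun x => g1.contains (f x)) then 1
           else if tl.any (fun x => g2.contains (f x)) then 2 else 3) := by
      have := fold_fst (fun x => rankOf [g0, g1, g2] 0 (f x)) f tl 3 []
      rw [this]
      have hcong : tl.foldl (fun b x => min b (rankOf [g0, g1, g2] 0 (f x))) 3
          = tl.foldl (fun b x => min b (if (fun x => g0.contains (f x)) x then 0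
              else if (fun x => g1.contains (f x)) x then 1
              else if (fun x => g2.contains (f x)) x then 2 else 3)) 3 := by
        rfl
      rw [hcong, min_rank_chain _ _ _ tl 3 (le_refl 3)]
      split_ifs <;> omega
    have hfoldsnd :
        (tl.foldl (fun (st : Nat × List String) x =>
          (if rankOf [g0, g1, g2] 0 (f x) < st.1 then rankOf [g0, g1, g2] 0 (f x) else st.1,
           st.2 ++ [f x])) (3, [])).2 = tl.map f :=
      fold_snd (fun x => rankOf [g0, g1, g2] 0 (f x)) f tl 3 []
    rw [hfoldfst, hfoldsnd]
    rw [if_congr (sum_indicator_pos_iff tl _) rfl rfl,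
        if_congr (sum_indicator_pos_iff tl _) rfl rfl,
        if_congr (sum_indicator_pos_iff tl _) rfl rfl]
    split_ifs <;> rfl
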